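-- pv_equiv track=rewrite | github.com/truenas/middleware | src/middlewared/middlewared/utils/security.py | check_password_complexity
-- ===== SOURCE A (Python) =====
-- import enum
-- from string import punctuation
--
-- class PasswordComplexity(enum.StrEnum):
--     UPPER = 'UPPER'
--     LOWER = 'LOWER'
--     NUMBER = 'NUMBER'
--     SPECIAL = 'SPECIAL'
--
--     def check_password(self, password: str) -> bool:
--         match self:
--             case PasswordComplexity.UPPER:
--                 return any([char.isupper() for char in password])
--             case PasswordComplexity.LOWER:
--                 return any([char.islower() for char in password])
--             case PasswordComplexity.NUMBER:
--                 return any([char.isdigit() for char in password])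
--             case PasswordComplexity.SPECIAL:
--                 return any([char in punctuation for char in password])
--             case _:
--                 raise ValueError(f'{self}: unhandled password complexity type')
--
-- def check_password_complexity(ruleset: set[str], password: str) -> set[PasswordComplexity]:
--     unmet: set[PasswordComplexity] = set()
--
--     if not isinstance(password, str):
--         raise TypeError(f'{type(password)}: password expected to be string')
--
--     if not isinstance(ruleset, set):
--         raise TypeError(f'{type(ruleset)}: ruleset expected to be a set')
--
--     for r in ruleset:
--         rule = PasswordComplexity(r)
--         if not rule.check_password(password):
--             unmet.add(rule)
--
--     return unmet
-- ===== SOURCE B (Python) =====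
-- import enum
-- from string import punctuation
--
-- class PasswordComplexity(enum.StrEnum):
--     UPPER = 'UPPER'
--     LOWER = 'LOWER'
--     NUMBER = 'NUMBER'
--     SPECIAL = 'SPECIAL'
--
-- def check_password_complexity(ruleset: set[str], password: str) -> set[PasswordComplexity]:
--     if not isinstance(password, str):
--         raise TypeError(f'{type(password)}: password expected to be string')
--
--     if not isinstance(ruleset, set):
--         raise TypeError(f'{type(ruleset)}: ruleset expected to be a set')
--
--     # single pass over the password: one flag per rule class
--     has_upper = has_lower = has_digit = has_special = False
--     for char in password:
--         if char.isupper():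
--             has_upper = True
--         if char.islower():
--             has_lower = True
--         if char.isdigit():
--             has_digit = True
--         if char in punctuation:
--             has_special = True
--
--     met = {
--         PasswordComplexity.UPPER: has_upper,
--         PasswordComplexity.LOWER: has_lower,
--         PasswordComplexity.NUMBER: has_digit,
--         PasswordComplexity.SPECIAL: has_special,
--     }
--
--     unmet: set[PasswordComplexity] = set()
--     for r in ruleset:
--         rule = PasswordComplexity(r)  # still raises ValueError on unknown rule strings
--         if not met[rule]:
--             unmet.add(rule)
--     return unmet
-- ===== Notes on version B (the rewrite author's own statement) =====
-- stated objective: alternative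
-- what changed: Instead of re-scanning the whole password once per rule (an any-comprehension per ruleset entry), B scans the password exactly once setting four boolean flags and then classifies each requested rule by a flag lookup.
import Mathlib
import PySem

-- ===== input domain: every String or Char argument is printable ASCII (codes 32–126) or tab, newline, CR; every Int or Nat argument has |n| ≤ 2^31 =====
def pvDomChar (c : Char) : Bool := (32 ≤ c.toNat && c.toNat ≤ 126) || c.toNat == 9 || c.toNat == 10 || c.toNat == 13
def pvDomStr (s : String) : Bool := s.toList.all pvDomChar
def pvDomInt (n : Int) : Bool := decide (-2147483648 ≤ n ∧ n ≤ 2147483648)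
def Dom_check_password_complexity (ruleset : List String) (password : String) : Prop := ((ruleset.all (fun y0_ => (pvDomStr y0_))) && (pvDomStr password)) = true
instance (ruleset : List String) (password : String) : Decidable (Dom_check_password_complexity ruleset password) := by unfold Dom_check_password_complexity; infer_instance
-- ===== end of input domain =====

-- B replaces A's per-rule rescans of the password by one pass that sets four boolean flags;
-- return value only (both Pythons return a fresh set).

-- string.punctuation, as a list of characters ('char in punctuation' on a single char is membership)
def pcPunctuation : List Char :=
  ['!', '"', '#', '$', '%', '&', '\'', '(', ')', '*', '+', ',', '-', '.', '/',
   ':', ';', '<', '=', '>', '?', '@', '[', '\\', ']', '^', '_', '`', '{', '|', '}', '~']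

-- ===== PORT A =====
-- PasswordComplexity.check_password; the final 'else true' is the unreachable
-- 'raise ValueError' branch (PasswordComplexity(r) has already raised, excluded by Pre_).
def pcCheckPassword (rule : String) (password : String) : Bool :=
  if rule == "UPPER" then password.toList.any (fun c => PySem.Chars.isupper c)
  else if rule == "LOWER" then password.toList.any (fun c => PySem.Chars.islower c)
  else if rule == "NUMBER" then password.toList.any (fun c => PySem.Chars.isdigit c)
  else if rule == "SPECIAL" then password.toList.any (fun c => pcPunctuation.contains c)
  else true

def check_password_complexity (ruleset : List String) (password : String) : List String :=
  ruleset.foldl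
    (fun unmet r => if pcCheckPassword r password then unmet else PySem.Set.add unmet r)
    (PySem.Set.empty)

-- ===== PORT B =====
-- one pass over the password: (has_upper, has_lower, has_digit, has_special)
def pcFlags (password : String) : Bool × Bool × Bool × Bool :=
  password.toList.foldl
    (fun f c =>
      (f.1 || PySem.Chars.isupper c,
       f.2.1 || PySem.Chars.islower c,
       f.2.2.1 || PySem.Chars.isdigit c,
       f.2.2.2 || pcPunctuation.contains c))
    (false, false, false, false)

-- 'met[rule]'; the final 'else true' is the unreachable invalid-rule branch
-- (PasswordComplexity(r) raises ValueError there, excluded by Pre_).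
def pcMet (f : Bool × Bool × Bool × Bool) (rule : String) : Bool :=
  if rule == "UPPER" then f.1
  else if rule == "LOWER" then f.2.1
  else if rule == "NUMBER" then f.2.2.1
  else if rule == "SPECIAL" then f.2.2.2
  else true

def check_password_complexity_alt (ruleset : List String) (password : String) : List String :=
  let f := pcFlags password
  ruleset.foldl
    (fun unmet r => if pcMet f r then unmet else PySem.Set.add unmet r)
    (PySem.Set.empty)

-- ===== PRECONDITION & SPEC =====
-- Pre_ excludes rule strings outside the PasswordComplexity enum, on which
-- Python's PasswordComplexity(r) raises ValueError.
def Pre_check_password_complexity (ruleset : List String) (password : String) : Prop :=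
  ∀ r ∈ ruleset, r = "UPPER" ∨ r = "LOWER" ∨ r = "NUMBER" ∨ r = "SPECIAL"
instance (ruleset : List String) (password : String) : Decidable (Pre_check_password_complexity ruleset password) := by unfold Pre_check_password_complexity; infer_instance

def pvWitness_check_password_complexity : List String × String := (["UPPER", "NUMBER"], "abc!")

def Spec_check_password_complexity (ruleset : List String) (password : String) (out : List String) : Prop := out = check_password_complexity_alt ruleset password
instance (ruleset : List String) (password : String) (out : List String) : Decidable (Spec_check_password_complexity ruleset password out) := by unfold Spec_check_password_complexity; infer_instance

-- ===== CLAIM (what is proved, stated in full; the proofs are below) =====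
def Claim_equal_check_password_complexity : Prop := ∀ (ruleset : List String) (password : String), Dom_check_password_complexity ruleset password → Pre_check_password_complexity ruleset password → Spec_check_password_complexity ruleset password (check_password_complexity ruleset password)

-- ===== LEMMAS AND PROOFS =====

-- the one-pass fold computes the four 'any' scans of A, starting from any initial flags
theorem pcFlags_foldl (l : List Char) (f : Bool × Bool × Bool × Bool) :
    l.foldl
      (fun f c =>
        (f.1 || PySem.Chars.isupper c,
         f.2.1 || PySem.Chars.islower c,
         f.2.2.1 || PySem.Chars.isdigit c,
         f.2.2.2 || pcPunctuation.contains c))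
      f =
    (f.1 || l.any (fun c => PySem.Chars.isupper c),
     f.2.1 || l.any (fun c => PySem.Chars.islower c),
     f.2.2.1 || l.any (fun c => PySem.Chars.isdigit c),
     f.2.2.2 || l.any (fun c => pcPunctuation.contains c)) := by
  induction l generalizing f with
  | nil => simp
  | cons c t ih =>
      simp only [List.foldl_cons, ih, List.any_cons]
      simp [Bool.or_assoc]

theorem pcMet_flags_eq (password : String) (r : String) :
    pcMet (pcFlags password) r = pcCheckPassword r password := by
  unfold pcMet pcCheckPassword pcFlags
  rw [pcFlags_foldl]
  simp

-- ===== VERDICT (by name: the statement is the Claim_ definition above) =====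
theorem check_password_complexity_spec : Claim_equal_check_password_complexity := by
  intro ruleset password _ _
  unfold Spec_check_password_complexity check_password_complexity check_password_complexity_alt
  simp only [pcMet_flags_eq]
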